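-- pv_equiv track=rewrite | github.com/aserper/Deb2Arch | src/deb2arch/core/parser.py | parse_dependency_list
-- ===== SOURCE A (Python) =====
-- def parse_dependency_list(deps_str: str) -> list[str]:
--     """Parse a comma-separated dependency list.
--
--     Handles version constraints and alternatives (|).
--     For alternatives, takes the first option.
--
--     Args:
--         deps_str: Comma-separated dependency string.
--
--     Returns:
--         List of package names (without version constraints).
--     """
--     if not deps_str.strip():
--         return []
--
--     deps = []
--     for dep in deps_str.split(","):
--         dep = dep.strip()
--         if not dep:
--             continue
--
--         # Handle alternatives (a | b) - take first
--         if "|" in dep: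
--             dep = dep.split("|")[0].strip()
--
--         # Extract package name (remove version constraints)
--         # e.g., "libc6 (>= 2.17)" -> "libc6"
--         if "(" in dep:
--             dep = dep.split("(")[0].strip()
--
--         # Remove :arch suffix (e.g., "libc6:amd64" -> "libc6")
--         if ":" in dep:
--             dep = dep.split(":")[0].strip()
--
--         if dep:
--             deps.append(dep)
--
--     return deps
-- ===== SOURCE B (Python) =====
-- def parse_dependency_list(deps_str: str) -> list[str]:
--     """Parse a comma-separated dependency list (prefix-scan reimplementation)."""
--     deps = []
--     for tok in deps_str.split(","):
--         i = 0
--         while i < len(tok) and tok[i] not in "|(:":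
--             i += 1
--         name = tok[:i].strip()
--         if name:
--             deps.append(name)
--     return deps
-- ===== Notes on version B (the rewrite author's own statement) =====
-- stated objective: simpler
-- what changed: The per-token chain of three conditional split-then-strip passes is replaced by one linear scan that takes the prefix up to the first delimiter character and strips it once; the redundant leading blank-string guard is dropped.
import Mathlib
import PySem

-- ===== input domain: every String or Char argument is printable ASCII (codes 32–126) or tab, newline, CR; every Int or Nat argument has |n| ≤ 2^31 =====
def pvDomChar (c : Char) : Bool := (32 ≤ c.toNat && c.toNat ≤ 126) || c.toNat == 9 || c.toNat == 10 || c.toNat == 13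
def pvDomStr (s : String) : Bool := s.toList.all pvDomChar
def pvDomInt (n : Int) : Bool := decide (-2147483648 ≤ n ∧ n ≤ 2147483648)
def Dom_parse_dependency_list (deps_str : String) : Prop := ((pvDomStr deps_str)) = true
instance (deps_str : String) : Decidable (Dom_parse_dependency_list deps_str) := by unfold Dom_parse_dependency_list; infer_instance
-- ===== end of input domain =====

-- B replaces A's per-token chain of three conditional split/strip passes by a single
-- prefix-to-first-delimiter scan followed by one strip (simpler decomposition, same cost);
-- A's redundant leading blank-string guard is dropped in B.


-- ===== PORT A =====
-- per-iteration body of A's loop; `.headD []` is exact for `.split(c)[0]` (split never returns an empty list)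
def pdlStepA (acc : List (List Char)) (dep0 : List Char) : List (List Char) :=
  let dep := PySem.Chars.strip dep0
  if dep = [] then acc
  else
    let dep := if PySem.Chars.isIn ['|'] dep then PySem.Chars.strip ((PySem.Chars.splitOn dep ['|']).headD []) else dep
    let dep := if PySem.Chars.isIn ['('] dep then PySem.Chars.strip ((PySem.Chars.splitOn dep ['(']).headD []) else dep
    let dep := if PySem.Chars.isIn [':'] dep then PySem.Chars.strip ((PySem.Chars.splitOn dep [':']).headD []) else dep
    if dep = [] then acc else acc ++ [dep]

def parse_dependency_list (deps_str : String) : List String :=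
  if PySem.Chars.strip deps_str.toList = [] then []
  else ((PySem.Chars.splitOn deps_str.toList [',']).foldl pdlStepA []).map (fun cs => String.ofList cs)

-- ===== PORT B =====
-- the index scan `while i < len(tok) and tok[i] not in "|(:"` followed by `tok[:i]` is exactly takeWhile
def pdlName (tok : List Char) : List Char :=
  PySem.Chars.strip (tok.takeWhile (fun ch => !(PySem.Chars.isIn [ch] ['|', '(', ':'])))

def parse_dependency_list_alt (deps_str : String) : List String :=
  ((PySem.Chars.splitOn deps_str.toList [',']).foldl
      (fun out tok => let name := pdlName tok; if name = [] then out else out ++ [name])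
      []).map (fun cs => String.ofList cs)

-- ===== PRECONDITION & SPEC =====
def Spec_parse_dependency_list (deps_str : String) (out : List String) : Prop := out = parse_dependency_list_alt deps_str
instance (deps_str : String) (out : List String) : Decidable (Spec_parse_dependency_list deps_str out) := by unfold Spec_parse_dependency_list; infer_instance

-- ===== CLAIM (what is proved, stated in full; the proofs are below) =====
def Claim_equal_parse_dependency_list : Prop := ∀ (deps_str : String), Dom_parse_dependency_list deps_str → Spec_parse_dependency_list deps_str (parse_dependency_list deps_str)

-- ===== LEMMAS AND PROOFS =====

-- splitOn.go: a non-empty accumulator is a reversed prefix of the result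
theorem go_acc (sep : List Char) : ∀ (fuel : Nat) (l cur : List Char) (acc : List (List Char)),
    ∃ r, PySem.Chars.splitOn.go sep fuel l cur acc = acc.reverse ++ r := by
  intro fuel
  induction fuel with
  | zero => intro l cur acc; rw [PySem.Chars.splitOn.go.eq_def]; exact ⟨[cur.reverse ++ l], by simp⟩
  | succ n ih =>
    intro l cur acc
    rw [PySem.Chars.splitOn.go.eq_def]
    cases l with
    | nil => exact ⟨[cur.reverse], by simp⟩
    | cons a rest =>
      simp only []
      by_cases hp : sep.isPrefixOf (a :: rest) = true
      · simp only [hp, if_true]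
        obtain ⟨r, hr⟩ := ih (List.drop sep.length (a :: rest)) [] (cur.reverse :: acc)
        exact ⟨cur.reverse :: r, by simp [hr]⟩
      · simp only [hp]
        exact ih rest (a :: cur) acc

-- the first piece of a single-character split is the prefix before the first delimiter
theorem go_head (c : Char) : ∀ (fuel : Nat) (l cur : List Char), l.length < fuel →
    (PySem.Chars.splitOn.go [c] fuel l cur []).headD [] = cur.reverse ++ l.takeWhile (fun a => a != c) := by
  intro fuel
  induction fuel with
  | zero => intro l cur h; omega
  | succ n ih =>
    intro l cur h
    rw [PySem.Chars.splitOn.go.eq_def]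
    cases l with
    | nil => simp
    | cons a rest =>
      simp only []
      by_cases hac : a = c
      · have hp : List.isPrefixOf [c] (a :: rest) = true := by simp [hac, List.isPrefixOf]
        simp only [hp, if_true]
        obtain ⟨r, hr⟩ := go_acc [c] n (List.drop [c].length (a :: rest)) [] [cur.reverse]
        rw [hr]
        simp [hac]
      · have hp : List.isPrefixOf [c] (a :: rest) = false := by
          simp [List.isPrefixOf]; exact fun h => absurd h.symm hac
        simp only [hp, Bool.false_eq_true, if_false]
        rw [ih rest (a :: cur) (by simpa using Nat.lt_of_succ_lt_succ h)]
        simp [hac]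

theorem splitOn_head (s : List Char) (c : Char) :
    (PySem.Chars.splitOn s [c]).headD [] = s.takeWhile (fun a => a != c) := by
  rw [PySem.Chars.splitOn]
  simpa using go_head c (s.length + 1) s [] (by omega)

-- every character of every piece of splitOn comes from the split string (or the seeds)
theorem go_chars (sep : List Char) : ∀ (fuel : Nat) (l cur : List Char) (acc : List (List Char)) (t : List Char),
    t ∈ PySem.Chars.splitOn.go sep fuel l cur acc → ∀ ch ∈ t, ch ∈ l ∨ ch ∈ cur ∨ ∃ u ∈ acc, ch ∈ u := by
  intro fuel
  induction fuel with
  | zero =>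
    intro l cur acc t ht ch hch
    rw [PySem.Chars.splitOn.go.eq_def] at ht
    simp at ht
    rcases ht with h | h
    · right; right; exact ⟨t, h, hch⟩
    · subst h; rcases List.mem_append.1 hch with h | h
      · right; left; simpa using h
      · left; exact h
  | succ n ih =>
    intro l cur acc t ht ch hch
    rw [PySem.Chars.splitOn.go.eq_def] at ht
    cases l with
    | nil =>
      simp at ht
      rcases ht with h | h
      · right; right; exact ⟨t, h, hch⟩
      · subst h; right; left; simpa using hch
    | cons a rest =>
      simp only [] at ht
      by_cases hp : sep.isPrefixOf (a :: rest) = true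
      · simp only [hp, if_true] at ht
        rcases ih _ _ _ _ ht ch hch with h | h | ⟨u, hu, hchu⟩
        · left; exact List.mem_of_mem_drop h
        · simp at h
        · rcases List.mem_cons.1 hu with hu | hu
          · subst hu; right; left; simpa using hchu
          · right; right; exact ⟨u, hu, hchu⟩
      · simp only [hp, Bool.false_eq_true, if_false] at ht
        rcases ih _ _ _ _ ht ch hch with h | h | h
        · left; exact List.mem_cons_of_mem _ h
        · rcases List.mem_cons.1 h with h | h
          · left; simp [h]
          · right; left; exact h
        · right; right; exact h

theorem splitOn_chars (s sep t : List Char) (ht : t ∈ PySem.Chars.splitOn s sep)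
    (ch : Char) (hch : ch ∈ t) : ch ∈ s := by
  rw [PySem.Chars.splitOn] at ht
  rcases go_chars sep _ _ _ _ _ ht ch hch with h | h | ⟨u, hu, _⟩
  · exact h
  · simp at h
  · simp at hu

theorem strip_nil_of_all_ws (s : List Char) (h : ∀ c ∈ s, PySem.Chars.isspace c = true) :
    PySem.Chars.strip s = [] := by
  simp only [PySem.Chars.strip, PySem.Chars.lstrip, PySem.Chars.rstrip]
  rw [List.dropWhile_eq_nil_iff.2 h]
  simp

theorem all_ws_of_strip_nil (s : List Char) (h : PySem.Chars.strip s = []) :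
    ∀ c ∈ s, PySem.Chars.isspace c = true := by
  intro c hc
  simp [PySem.Chars.strip, PySem.Chars.lstrip, PySem.Chars.rstrip, List.dropWhile_eq_nil_iff] at h
  rcases List.mem_append.1 ((List.takeWhile_append_dropWhile (p := PySem.Chars.isspace) (l := s)) ▸ hc) with h' | h'
  · exact List.mem_takeWhile_imp h'
  · exact h c h'

-- a prefix of a list with no leading whitespace has no leading whitespace
theorem lstrip_of_prefix (z w : List Char) (hz : List.dropWhile PySem.Chars.isspace z = z)
    (hw : w <+: z) : List.dropWhile PySem.Chars.isspace w = w := by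
  cases w with
  | nil => rfl
  | cons a t =>
    by_cases hws : PySem.Chars.isspace a = true
    · exfalso
      obtain ⟨r, hr⟩ := hw
      rw [← hr] at hz
      simp only [List.cons_append, List.dropWhile_cons, hws, if_true] at hz
      have := List.Sublist.length_le (List.dropWhile_sublist (l := t ++ r) (p := PySem.Chars.isspace))
      rw [hz] at this
      simp at this
    · simp [hws]

theorem rstrip_prefix (x : List Char) : PySem.Chars.rstrip x <+: x := by
  have h := List.dropWhile_suffix (l := x.reverse) (p := PySem.Chars.isspace)
  rw [PySem.Chars.rstrip]
  have h2 := List.reverse_prefix.2 h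
  simpa using h2

theorem lstrip_strip (s : List Char) :
    List.dropWhile PySem.Chars.isspace (PySem.Chars.strip s) = PySem.Chars.strip s :=
  lstrip_of_prefix _ _ (List.dropWhile_idempotent _ _) (by
    rw [PySem.Chars.strip, PySem.Chars.lstrip]
    exact rstrip_prefix _)

theorem rstrip_rstrip (x : List Char) : PySem.Chars.rstrip (PySem.Chars.rstrip x) = PySem.Chars.rstrip x := by
  simp [PySem.Chars.rstrip, List.dropWhile_idempotent]

theorem strip_idem (s : List Char) : PySem.Chars.strip (PySem.Chars.strip s) = PySem.Chars.strip s := by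
  conv_lhs => rw [PySem.Chars.strip, PySem.Chars.lstrip, lstrip_strip]
  rw [PySem.Chars.strip, rstrip_rstrip]

theorem rstrip_append_ws (z w : List Char) (hw : ∀ c ∈ w, PySem.Chars.isspace c = true) :
    PySem.Chars.rstrip (z ++ w) = PySem.Chars.rstrip z := by
  simp only [PySem.Chars.rstrip, List.reverse_append, List.dropWhile_append]
  rw [List.dropWhile_eq_nil_iff.2 (by simpa using hw)]
  simp

theorem strip_append_ws (y w : List Char) (hw : ∀ c ∈ w, PySem.Chars.isspace c = true) :
    PySem.Chars.strip (y ++ w) = PySem.Chars.strip y := by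
  simp only [PySem.Chars.strip, PySem.Chars.lstrip, List.dropWhile_append]
  by_cases h : List.dropWhile PySem.Chars.isspace y = []
  · rw [h]
    simp only [List.isEmpty_nil, if_true]
    rw [List.dropWhile_eq_nil_iff.2 hw]
  · rw [if_neg (by simpa using h)]
    exact rstrip_append_ws _ _ hw

theorem rstrip_decomp (x : List Char) :
    ∃ w, x = PySem.Chars.rstrip x ++ w ∧ ∀ c ∈ w, PySem.Chars.isspace c = true := by
  refine ⟨(List.takeWhile PySem.Chars.isspace x.reverse).reverse, ?_, ?_⟩
  · rw [PySem.Chars.rstrip, ← List.reverse_append, List.takeWhile_append_dropWhile, List.reverse_reverse]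
  · intro c hc
    exact List.mem_takeWhile_imp (by simpa using hc)

theorem takeWhile_congr' (p q : Char → Bool) (l : List Char) (h : ∀ a ∈ l, p a = q a) :
    l.takeWhile p = l.takeWhile q := by
  induction l with
  | nil => rfl
  | cons a t ih =>
    simp only [List.takeWhile_cons, h a (by simp)]
    split <;> simp_all

-- lstrip commutes with the delimiter-prefix for a non-space delimiter
theorem lstrip_takeWhile (c : Char) (hc : PySem.Chars.isspace c = false) (u : List Char) :
    List.dropWhile PySem.Chars.isspace (u.takeWhile (fun a => a != c)) =
      (List.dropWhile PySem.Chars.isspace u).takeWhile (fun a => a != c) := by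
  conv_lhs => rw [← List.takeWhile_append_dropWhile (p := PySem.Chars.isspace) (l := u)]
  have hws : ∀ a ∈ List.takeWhile PySem.Chars.isspace u, (a != c) = true := by
    intro a ha
    have := List.mem_takeWhile_imp ha
    simp only [bne_iff_ne, ne_eq]
    rintro rfl; rw [this] at hc; cases hc
  rw [List.takeWhile_append_of_pos hws, List.dropWhile_append]
  rw [List.dropWhile_eq_nil_iff.2 (fun a ha => List.mem_takeWhile_imp ha)]
  simp only [List.isEmpty_nil, if_true]
  exact lstrip_of_prefix _ _ (List.dropWhile_idempotent _ _) (List.takeWhile_prefix _)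

theorem strip_takeWhile_rstrip (c : Char) (hc : PySem.Chars.isspace c = false) (x : List Char) :
    PySem.Chars.strip ((PySem.Chars.rstrip x).takeWhile (fun a => a != c)) =
      PySem.Chars.strip (x.takeWhile (fun a => a != c)) := by
  obtain ⟨w, hx, hw⟩ := rstrip_decomp x
  conv_rhs => rw [hx]
  rw [List.takeWhile_append]
  by_cases hall : ((PySem.Chars.rstrip x).takeWhile (fun a => a != c)).length = (PySem.Chars.rstrip x).length
  · rw [if_pos hall]
    have heq : (PySem.Chars.rstrip x).takeWhile (fun a => a != c) = PySem.Chars.rstrip x :=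
      (List.takeWhile_sublist _).eq_of_length hall
    rw [heq, strip_append_ws _ _ (fun a ha => hw a ((List.takeWhile_sublist _).mem ha))]
  · rw [if_neg hall]

theorem strip_lstrip (z : List Char) :
    PySem.Chars.strip (PySem.Chars.lstrip z) = PySem.Chars.strip z := by
  simp only [PySem.Chars.strip, PySem.Chars.lstrip, List.dropWhile_idempotent]

-- stripping before cutting at a non-space delimiter changes nothing after the final strip
theorem strip_takeWhile_strip (c : Char) (hc : PySem.Chars.isspace c = false) (u : List Char) :
    PySem.Chars.strip ((PySem.Chars.strip u).takeWhile (fun a => a != c)) =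
      PySem.Chars.strip (u.takeWhile (fun a => a != c)) := by
  have h2 : PySem.Chars.strip ((PySem.Chars.strip u).takeWhile (fun a => a != c)) =
      PySem.Chars.strip ((PySem.Chars.lstrip u).takeWhile (fun a => a != c)) :=
    strip_takeWhile_rstrip c hc (PySem.Chars.lstrip u)
  rw [h2]
  have h1 := lstrip_takeWhile c hc u
  calc PySem.Chars.strip ((PySem.Chars.lstrip u).takeWhile (fun a => a != c))
      = PySem.Chars.strip ((List.dropWhile PySem.Chars.isspace u).takeWhile (fun a => a != c)) := rfl
    _ = PySem.Chars.strip (List.dropWhile PySem.Chars.isspace (u.takeWhile (fun a => a != c))) := by rw [h1]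
    _ = PySem.Chars.strip (PySem.Chars.lstrip (u.takeWhile (fun a => a != c))) := rfl
    _ = PySem.Chars.strip (u.takeWhile (fun a => a != c)) := strip_lstrip _

theorem isIn_singleton (c : Char) (s : List Char) :
    PySem.Chars.isIn [c] s = decide (c ∈ s) := by
  by_cases h : c ∈ s
  · simp [h, (PySem.Chars.isIn_iff_infix _ _).2 ((List.singleton_infix_iff c s).2 h)]
  · have hf := (PySem.Chars.isIn_eq_false_iff _ _).2 (fun hin => h ((List.singleton_infix_iff c s).1 hin))
    simp [h, hf]

-- one conditional split-and-strip pass of A = strip of the prefix before that delimiter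
theorem stage_eq (c : Char) (s : List Char) (hs : PySem.Chars.strip s = s) :
    (if PySem.Chars.isIn [c] s then PySem.Chars.strip ((PySem.Chars.splitOn s [c]).headD []) else s)
      = PySem.Chars.strip (s.takeWhile (fun a => a != c)) := by
  by_cases h : c ∈ s
  · rw [if_pos (by simp [isIn_singleton, h]), splitOn_head]
  · rw [if_neg (by simp [isIn_singleton, h])]
    rw [List.takeWhile_eq_self_iff.mpr (fun a ha => by
      simp only [bne_iff_ne, ne_eq]; rintro rfl; exact h ha)]
    exact hs.symm

theorem stepA_eq (acc : List (List Char)) (tok : List Char) :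
    pdlStepA acc tok =
      (fun out t => let name := pdlName t; if name = [] then out else out ++ [name]) acc tok := by
  simp only [pdlStepA, pdlName]
  by_cases h0 : PySem.Chars.strip tok = []
  · rw [if_pos h0]
    have hname : PySem.Chars.strip (tok.takeWhile (fun ch => !(PySem.Chars.isIn [ch] ['|', '(', ':']))) = [] :=
      strip_nil_of_all_ws _ (fun ch hch =>
        all_ws_of_strip_nil tok h0 ch ((List.takeWhile_sublist _).mem hch))
    rw [hname]
    simp
  · rw [if_neg h0]
    rw [stage_eq '|' (PySem.Chars.strip tok) (strip_idem tok)]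
    rw [stage_eq '(' _ (strip_idem _)]
    rw [stage_eq ':' _ (strip_idem _)]
    rw [strip_takeWhile_strip '|' (by decide) tok]
    rw [strip_takeWhile_strip '(' (by decide) (tok.takeWhile (fun a => a != '|'))]
    rw [strip_takeWhile_strip ':' (by decide) ((tok.takeWhile (fun a => a != '|')).takeWhile (fun a => a != '('))]
    rw [List.takeWhile_takeWhile, List.takeWhile_takeWhile]
    rw [takeWhile_congr' _ (fun ch => !(PySem.Chars.isIn [ch] ['|', '(', ':'])) tok (fun a _ => by
      by_cases h1 : a = '|' <;> by_cases h2 : a = '(' <;> by_cases h3 : a = ':' <;>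
        simp [h1, h2, h3, isIn_singleton])]

theorem foldl_skip (ts : List (List Char)) :
    ∀ out, (∀ t ∈ ts, pdlName t = []) →
      ts.foldl (fun out tok => let name := pdlName tok; if name = [] then out else out ++ [name]) out = out := by
  induction ts with
  | nil => intro out _; rfl
  | cons t rest ih =>
    intro out h
    simp only [List.foldl_cons, h t (by simp)]
    exact ih out (fun u hu => h u (List.mem_cons_of_mem _ hu))

-- ===== VERDICT (by name: the statement is the Claim_ definition above) =====
theorem parse_dependency_list_spec : Claim_equal_parse_dependency_list := by
  intro s _
  unfold Spec_parse_dependency_list parse_dependency_list parse_dependency_list_alt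
  by_cases hg : PySem.Chars.strip s.toList = []
  · rw [if_pos hg]
    rw [foldl_skip _ _ (fun t ht =>
      strip_nil_of_all_ws _ (fun ch hch =>
        all_ws_of_strip_nil s.toList hg ch
          (splitOn_chars s.toList [','] t ht ch ((List.takeWhile_sublist _).mem hch))))]
    simp
  · rw [if_neg hg]
    rw [show pdlStepA = (fun out tok => let name := pdlName tok; if name = [] then out else out ++ [name]) from
      funext fun acc => funext fun tok => stepA_eq acc tok]
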